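-- pv_equiv track=rewrite | github.com/software-opal/archivelib-rs | test_case_gen.py | bytes_to_rust_array
-- ===== SOURCE A (Python) =====
-- def bytes_to_rust_array(data):
--     aparts = []
--     out = ""
--     for b in data:
--         aparts.append(f"0x{b:02X},")
--         if len(aparts) >= 16:
--             out += f'{" ".join(aparts)}\n'
--             aparts = []
--     if aparts:
--         out += f'{" ".join(aparts)}\n'
--     return f"[\n{out}]\n"
-- ===== SOURCE B (Python) =====
-- def bytes_to_rust_array(data):
--     tokens = [f"0x{b:02X}," for b in data]
--     lines = []
--     i = 0
--     while i < len(tokens):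
--         lines.append(" ".join(tokens[i:i+16]) + "\n")
--         i += 16
--     return "[\n" + "".join(lines) + "]\n"
-- ===== Notes on version B (the rewrite author's own statement) =====
-- stated objective: idiomatic
-- what changed: B first maps every byte to its formatted token, then emits one line per 16-token slice with an index stepped by 16 and joins the collected lines at the end, replacing A's single pass that maintains a buffer with a length-guarded flush plus a duplicated final flush.
import Mathlib
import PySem

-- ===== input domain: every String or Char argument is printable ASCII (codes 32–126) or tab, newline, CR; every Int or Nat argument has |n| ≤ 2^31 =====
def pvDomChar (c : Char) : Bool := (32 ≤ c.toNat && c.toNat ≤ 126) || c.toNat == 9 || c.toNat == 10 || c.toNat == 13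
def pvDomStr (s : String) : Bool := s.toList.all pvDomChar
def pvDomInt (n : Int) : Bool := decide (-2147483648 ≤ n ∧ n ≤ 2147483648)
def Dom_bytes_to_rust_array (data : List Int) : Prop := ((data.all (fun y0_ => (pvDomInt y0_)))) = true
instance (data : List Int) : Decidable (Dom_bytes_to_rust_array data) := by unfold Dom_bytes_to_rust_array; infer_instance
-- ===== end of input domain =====

-- B builds all tokens first and then chunks them by slicing, instead of A's single pass that
-- counts and flushes a 16-element buffer with a duplicated final flush; objective: idiomatic.

-- shared token formatter: f"0x{b:02X}," — hand port, exact for every Int at width 2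
-- (Python '02X': nonnegative → uppercase hex zero-padded to 2; negative → '-' + hex of |b|,
--  and since '-' plus at least one digit already fills width 2, no zero fill occurs).
def pvHexDigit (n : Nat) : Char := Char.ofNat (if n < 10 then 48 + n else 55 + n)

def pvToHexChars (n : Nat) : List Char :=
  if n < 16 then [pvHexDigit n]
  else pvToHexChars (n / 16) ++ [pvHexDigit (n % 16)]
decreasing_by exact Nat.div_lt_self (by omega) (by omega)

def pvFmt02X (b : Int) : String :=
  if b < 0 then "-" ++ String.ofList (pvToHexChars b.natAbs)
  else
    let d := pvToHexChars b.toNat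
    String.ofList (if d.length < 2 then '0' :: d else d)

def pvTok (b : Int) : String := "0x" ++ pvFmt02X b ++ ","

-- ===== PORT A =====
-- loop body of A: aparts.append(f"0x{b:02X},"); flush ' '.join(aparts)+'\n' when len ≥ 16
def pvAStep (st : List String × String) (b : Int) : List String × String :=
  let aparts := st.1 ++ [pvTok b]
  if aparts.length ≥ 16 then ([], st.2 ++ String.intercalate " " aparts ++ "\n")
  else (aparts, st.2)

-- A's trailing 'if aparts: out += ...'
def pvAFin (st : List String × String) : String :=
  if st.1 = [] then st.2 else st.2 ++ String.intercalate " " st.1 ++ "\n"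

def bytes_to_rust_array (data : List Int) : String :=
  "[\n" ++ pvAFin (data.foldl pvAStep ([], "")) ++ "]\n"

-- ===== PORT B =====
-- B's while loop over an index stepped by 16; tokens[i:i+16] is PySem.List.slice
def pvChunkLoop (tokens : List String) (i : Nat) (lines : List String) : List String :=
  if i < tokens.length then
    pvChunkLoop tokens (i + 16)
      (lines ++ [String.intercalate " " (PySem.List.slice tokens (some (i : Int)) (some ((i : Int) + 16))) ++ "\n"])
  else lines
termination_by tokens.length - i

def bytes_to_rust_array_alt (data : List Int) : String :=
  "[\n" ++ String.join (pvChunkLoop (data.map pvTok) 0 []) ++ "]\n"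

-- ===== PRECONDITION & SPEC =====
def Spec_bytes_to_rust_array (data : List Int) (out : String) : Prop := out = bytes_to_rust_array_alt data
instance (data : List Int) (out : String) : Decidable (Spec_bytes_to_rust_array data out) := by unfold Spec_bytes_to_rust_array; infer_instance

-- ===== CLAIM (what is proved, stated in full; the proofs are below) =====
def Claim_equal_bytes_to_rust_array : Prop := ∀ (data : List Int), Dom_bytes_to_rust_array data → Spec_bytes_to_rust_array data (bytes_to_rust_array data)

-- ===== LEMMAS AND PROOFS =====

-- proof-only bridge: chunk-of-16 recursion on the remaining token list
def pvChunkLines (tokens : List String) (out : String) : String :=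
  if h : tokens = [] then out
  else pvChunkLines (tokens.drop 16) (out ++ String.intercalate " " (tokens.take 16) ++ "\n")
termination_by tokens.length
decreasing_by
  have := List.length_pos_of_ne_nil h
  simp [List.length_drop]; omega

theorem pvChunkLines_nil (out : String) : pvChunkLines [] out = out := by
  rw [pvChunkLines]
  simp

theorem pvChunkLines_short (ts : List String) (out : String) (h : ts ≠ []) (hl : ts.length ≤ 16) :
    pvChunkLines ts out = out ++ String.intercalate " " ts ++ "\n" := by
  rw [pvChunkLines]
  simp [h, List.take_of_length_le hl, List.drop_eq_nil_of_le hl, pvChunkLines_nil]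

theorem pvChunkLines_full (a rest : List String) (out : String) (h : a.length = 16) :
    pvChunkLines (a ++ rest) out = pvChunkLines rest (out ++ String.intercalate " " a ++ "\n") := by
  have hne : a ++ rest ≠ [] := by
    intro hc
    have := congrArg List.length hc
    simp [h] at this
  rw [pvChunkLines]
  simp [hne, List.take_left' h, List.drop_left' h]

-- the loop invariant tying A's counter-flush pass to B's chunking
theorem pvMain : ∀ (data : List Int) (ap : List String) (out : String), ap.length < 16 →
    pvAFin (data.foldl pvAStep (ap, out)) = pvChunkLines (ap ++ data.map pvTok) out := by
  intro data
  induction data with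
  | nil =>
    intro ap out hlt
    by_cases hap : ap = []
    · simp [hap, pvAFin, pvChunkLines_nil]
    · simp only [List.foldl_nil, List.map_nil, List.append_nil]
      rw [pvChunkLines_short ap out hap (by omega)]
      simp [pvAFin, hap]
  | cons b rest ih =>
    intro ap out hlt
    rw [List.foldl_cons]
    have hsplit : ap ++ (b :: rest).map pvTok = (ap ++ [pvTok b]) ++ rest.map pvTok := by
      simp
    by_cases hfull : (ap ++ [pvTok b]).length ≥ 16
    · have h16 : (ap ++ [pvTok b]).length = 16 := by
        simp at hfull ⊢; omega
      have hstep : pvAStep (ap, out) b = ([], out ++ String.intercalate " " (ap ++ [pvTok b]) ++ "\n") := by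
        simp only [pvAStep]
        rw [if_pos hfull]
      rw [hstep, hsplit, pvChunkLines_full _ _ _ h16]
      simpa using ih [] (out ++ String.intercalate " " (ap ++ [pvTok b]) ++ "\n") (by simp)
    · have hstep : pvAStep (ap, out) b = (ap ++ [pvTok b], out) := by
        simp only [pvAStep]
        rw [if_neg hfull]
      rw [hstep, hsplit]
      exact ih (ap ++ [pvTok b]) out (by simp at hfull ⊢; omega)

theorem pvJoin_snoc (l : List String) (x : String) : String.join (l ++ [x]) = String.join l ++ x := by
  simp [String.join]

-- B's index loop (joined) equals the bridge recursion on the dropped suffix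
theorem pvChunkLoop_eq : ∀ (ts : List String) (i : Nat) (lines : List String),
    String.join (pvChunkLoop ts i lines) = pvChunkLines (ts.drop i) (String.join lines) := by
  intro ts i
  induction hn : ts.length - i using Nat.strong_induction_on generalizing i with
  | _ n ih =>
    intro lines
    by_cases hlt : i < ts.length
    · have hdne : ts.drop i ≠ [] := by
        intro hc
        have := congrArg List.length hc
        simp [List.length_drop] at this
        omega
      have hsl : PySem.List.slice ts (some (i : Int)) (some ((i : Int) + 16)) = (ts.drop i).take 16 := by
        have := PySem.List.slice_natCast_add (xs := ts) (j := i) (n := 16)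
        simpa using this
      rw [pvChunkLoop, if_pos hlt, hsl, ih (ts.length - (i + 16)) (by omega) (i + 16) rfl, pvJoin_snoc]
      conv_rhs => rw [pvChunkLines]
      rw [dif_neg hdne]
      congr 1
      rw [List.drop_drop]
      rw [String.append_assoc]
    · rw [pvChunkLoop, if_neg hlt, List.drop_of_length_le (by omega), pvChunkLines_nil]

-- ===== VERDICT (by name: the statement is the Claim_ definition above) =====
theorem bytes_to_rust_array_spec : Claim_equal_bytes_to_rust_array := by
  intro data _
  unfold Spec_bytes_to_rust_array bytes_to_rust_array bytes_to_rust_array_alt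
  rw [pvMain data [] "" (by simp), pvChunkLoop_eq]
  simp [String.join]
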